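-- pv_equiv track=rewrite | github.com/PearuUu/CKE_Zbor_Zadan_zadanie_praktyczne | 69.py | Z4
-- ===== SOURCE A (Python) =====
-- def znajdz_geny(genotyp):
--     geny = []
--     czy_gen = False
--     for i in range(len(genotyp)-1):
--         if genotyp[i] == "A" and genotyp[i+1] == "A" and czy_gen == False:
--             czy_gen = True
--             gen = ""
--         elif genotyp[i] == "B" and genotyp[i+1] == "B" and czy_gen == True:
--             czy_gen = False
--             gen += "BB"
--             geny.append(gen)
--         if czy_gen:
--             gen += genotyp[i]
--     return geny
--
-- def Z4(genotypy):
--     silnie_odporne = 0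
--     odporne = 0
--     for genotyp in genotypy:
--         if genotyp == genotyp[::-1]:
--             silnie_odporne += 1
--             odporne += 1
--         elif znajdz_geny(genotyp) == znajdz_geny(genotyp[::-1]):
--             odporne += 1
--     return odporne, silnie_odporne
-- ===== SOURCE B (Python) =====
-- def znajdz_geny(genotyp):
--     geny = []
--     i = 0
--     while True:
--         a = genotyp.find("AA", i)
--         if a == -1:
--             break
--         b = genotyp.find("BB", a + 2)
--         if b == -1:
--             break
--         geny.append(genotyp[a:b + 2])
--         i = b + 2
--     return geny
--
-- def Z4(genotypy):
--     silnie = sum(1 for g in genotypy if g == g[::-1])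
--     odporne = silnie + sum(1 for g in genotypy
--                            if g != g[::-1] and znajdz_geny(g) == znajdz_geny(g[::-1]))
--     return odporne, silnie
-- ===== Notes on version B (the rewrite author's own statement) =====
-- stated objective: faster
-- what changed: znajdz_geny's per-character state machine (czy_gen flag, manual string accumulation) is replaced by a find-and-jump scan (str.find for 'AA', then for 'BB', slice out the gene, jump past the match), and Z4's counter loop by two comprehension-style counts.
import Mathlib
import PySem

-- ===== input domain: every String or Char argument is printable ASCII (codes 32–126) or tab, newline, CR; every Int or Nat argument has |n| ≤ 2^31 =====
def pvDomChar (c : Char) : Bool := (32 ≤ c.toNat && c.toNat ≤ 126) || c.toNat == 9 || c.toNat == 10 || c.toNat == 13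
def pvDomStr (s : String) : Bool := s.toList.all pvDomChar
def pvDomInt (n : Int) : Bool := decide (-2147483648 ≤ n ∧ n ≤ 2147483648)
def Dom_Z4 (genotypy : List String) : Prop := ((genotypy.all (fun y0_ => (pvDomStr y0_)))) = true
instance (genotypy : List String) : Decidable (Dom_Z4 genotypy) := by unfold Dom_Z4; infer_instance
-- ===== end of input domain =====

-- B replaces A's per-character state-machine gene scanner with an idiomatic find-and-jump scan
-- (str.find for "AA" then for "BB") and counts Z4's two tallies with comprehension-style counts.

-- ===== PORT A =====
-- znajdz_geny's for-loop over range(len-1) with state (geny, czy_gen, gen);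
-- g[i]/g[i+1] are in range under the guard i+1 < len, so getD is exact there.
def znGenyLoopA (g : List Char) (i : Nat) (geny : List (List Char)) (czy : Bool)
    (gen : List Char) : List (List Char) :=
  if _h : i + 1 < g.length then
    let ci := g.getD i ' '
    let ci1 := g.getD (i+1) ' '
    -- the trailing `if czy_gen: gen += genotyp[i]` of the Python body is merged into each branch
    if ci = 'A' ∧ ci1 = 'A' ∧ czy = false then
      znGenyLoopA g (i+1) geny true ([] ++ [ci])          -- open: gen = "" then gen += g[i]
    else if ci = 'B' ∧ ci1 = 'B' ∧ czy = true then
      znGenyLoopA g (i+1) (geny ++ [gen ++ ['B','B']]) false (gen ++ ['B','B'])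
    else if czy then
      znGenyLoopA g (i+1) geny czy (gen ++ [ci])
    else
      znGenyLoopA g (i+1) geny czy gen
  else geny
termination_by g.length - i

def znajdzGenyA (g : List Char) : List (List Char) := znGenyLoopA g 0 [] false []

def Z4step (s : Int × Int) (genotyp : String) : Int × Int :=
  let l := genotyp.toList
  if l = l.reverse then (s.1 + 1, s.2 + 1)
  else if znajdzGenyA l = znajdzGenyA l.reverse then (s.1 + 1, s.2)
  else s

def Z4 (genotypy : List String) : Int × Int :=
  genotypy.foldl Z4step (0, 0)

-- ===== PORT B =====
-- str.find(pat, i): first index j ≥ i where pat is a prefix of the suffix; none = -1.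
def findSub (g pat : List Char) (i : Nat) : Option Nat :=
  if _h : i < g.length then
    if pat.isPrefixOf (g.drop i) then some i else findSub g pat (i+1)
  else none
termination_by g.length - i

-- cited by loopB's decreasing_by
theorem findSub_some_lt (g pat : List Char) :
    ∀ n i b, g.length - i ≤ n → findSub g pat i = some b → i ≤ b ∧ b < g.length := by
  intro n
  induction n with
  | zero =>
    intro i b hn h
    rw [findSub] at h
    rw [dif_neg (by omega)] at h
    exact absurd h (by simp)
  | succ n ih =>
    intro i b hn h
    rw [findSub] at h
    by_cases h1 : i < g.length
    · rw [dif_pos h1] at h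
      by_cases h2 : pat.isPrefixOf (g.drop i) = true
      · rw [if_pos h2] at h
        injection h with h
        subst h
        exact ⟨le_refl _, h1⟩
      · rw [if_neg h2] at h
        have := ih (i+1) b (by omega) h
        exact ⟨by omega, this.2⟩
    · rw [dif_neg h1] at h
      exact absurd h (by simp)

-- Source B's while-loop: find "AA", then the first "BB" after it, emit the slice, jump past it.
def loopB (g : List Char) (i : Nat) : List (List Char) :=
  match hA : findSub g ['A','A'] i with
  | none => []
  | some a =>
    match hB : findSub g ['B','B'] (a+2) with
    | none => []
    | some b => (g.drop a).take (b + 2 - a) :: loopB g (b + 2)  -- g[a:b+2], indices in range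
termination_by g.length - i
decreasing_by
  have h1 := findSub_some_lt g ['A','A'] (g.length - i) i a (le_refl _) hA
  have h2 := findSub_some_lt g ['B','B'] (g.length - (a+2)) (a+2) b (le_refl _) hB
  omega

def znajdzGenyB (g : List Char) : List (List Char) := loopB g 0

def Z4_alt (genotypy : List String) : Int × Int :=
  let silnie : Int := (genotypy.countP (fun g => decide (g.toList = g.toList.reverse)) : Nat)
  let extra : Int := (genotypy.countP (fun g =>
    decide (¬ g.toList = g.toList.reverse) &&
    decide (znajdzGenyB g.toList = znajdzGenyB g.toList.reverse)) : Nat)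
  (silnie + extra, silnie)

-- ===== PRECONDITION & SPEC =====
def Spec_Z4 (genotypy : List String) (out : Int × Int) : Prop := out = Z4_alt genotypy
instance (genotypy : List String) (out : Int × Int) : Decidable (Spec_Z4 genotypy out) := by unfold Spec_Z4; infer_instance

-- ===== CLAIM (what is proved, stated in full; the proofs are below) =====
def Claim_equal_Z4 : Prop := ∀ (genotypy : List String), Dom_Z4 genotypy → Spec_Z4 genotypy (Z4 genotypy)

-- ===== LEMMAS AND PROOFS =====

theorem getD_drop (g : List Char) (n m : Nat) :
    (g.drop n).getD m ' ' = g.getD (n+m) ' ' := by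
  simp [List.getD_eq_getElem?_getD, List.getElem?_drop]

theorem pref2_iff (g : List Char) (j : Nat) (c1 c2 : Char) :
    ([c1, c2].isPrefixOf (g.drop j)) = true ↔
      (j + 1 < g.length ∧ g.getD j ' ' = c1 ∧ g.getD (j+1) ' ' = c2) := by
  rcases hd : g.drop j with _ | ⟨x, _ | ⟨y, rest⟩⟩
  · have hl : g.length - j = 0 := by simpa using congrArg List.length hd
    simp [List.isPrefixOf]
    omega
  · have hl : g.length - j = 1 := by simpa using congrArg List.length hd
    simp [List.isPrefixOf]
    omega
  · have hl : g.length - j = rest.length + 2 := by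
      have := congrArg List.length hd
      simp at this; omega
    have h1 : g.getD j ' ' = x := by
      have := getD_drop g j 0
      rw [hd] at this; simpa using this.symm
    have h2 : g.getD (j+1) ' ' = y := by
      have := getD_drop g j 1
      rw [hd] at this; simpa using this.symm
    constructor
    · intro hp
      have hxy : c1 = x ∧ c2 = y := by simpa [List.isPrefixOf] using hp
      exact ⟨by omega, by rw [h1, hxy.1], by rw [h2, hxy.2]⟩
    · rintro ⟨-, e1, e2⟩
      obtain rfl : x = c1 := h1.symm.trans e1
      obtain rfl : y = c2 := h2.symm.trans e2
      simp [List.isPrefixOf]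
theorem findSub_stop (g pat : List Char) (i : Nat) (h : g.length ≤ i) :
    findSub g pat i = none := by
  rw [findSub]; rw [dif_neg (by omega)]

theorem findSub_hit (g pat : List Char) (i : Nat) (h1 : i < g.length)
    (h2 : pat.isPrefixOf (g.drop i) = true) : findSub g pat i = some i := by
  rw [findSub]; rw [dif_pos h1, if_pos h2]

theorem findSub_step (g pat : List Char) (i : Nat)
    (h2 : ¬ pat.isPrefixOf (g.drop i) = true) :
    findSub g pat i = findSub g pat (i+1) := by
  by_cases h1 : i < g.length
  · rw [findSub]; rw [dif_pos h1, if_neg h2]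
  · rw [findSub_stop g pat i (by omega), findSub_stop g pat (i+1) (by omega)]

theorem findSub_pair_none (g : List Char) (c1 c2 : Char) :
    ∀ n i, g.length - i ≤ n → g.length ≤ i + 1 → findSub g [c1,c2] i = none := by
  intro n
  induction n with
  | zero => intro i h1 h2; exact findSub_stop g _ i (by omega)
  | succ n ih =>
    intro i h1 h2
    by_cases hl : i < g.length
    · have hp : ¬ ([c1,c2].isPrefixOf (g.drop i)) = true := by
        intro hp
        have := (pref2_iff g i c1 c2).mp hp
        omega
      rw [findSub_step g _ i hp]
      exact ih (i+1) (by omega) (by omega)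
    · exact findSub_stop g _ i (by omega)

theorem findSub_some (g : List Char) (c1 c2 : Char) :
    ∀ n i b, g.length - i ≤ n → findSub g [c1,c2] i = some b →
      i ≤ b ∧ b + 1 < g.length ∧ g.getD b ' ' = c1 ∧ g.getD (b+1) ' ' = c2 := by
  intro n
  induction n with
  | zero =>
    intro i b hn h
    rw [findSub_stop g _ i (by omega)] at h
    exact absurd h (by simp)
  | succ n ih =>
    intro i b hn h
    by_cases hl : i < g.length
    · by_cases hp : ([c1,c2].isPrefixOf (g.drop i)) = true
      · rw [findSub_hit g _ i hl hp] at h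
        injection h with h
        subst h
        exact ⟨le_refl _, (pref2_iff g i c1 c2).mp hp⟩
      · rw [findSub_step g _ i hp] at h
        have := ih (i+1) b (by omega) h
        exact ⟨by omega, this.2⟩
    · rw [findSub_stop g _ i (by omega)] at h
      exact absurd h (by simp)

theorem take_drop_succ (g : List Char) (i n : Nat) (h : i < g.length) :
    (g.drop i).take (n+1) = g.getD i ' ' :: (g.drop (i+1)).take n := by
  have hd : g.drop i = g.getD i ' ' :: g.drop (i+1) := by
    rw [List.drop_eq_getElem_cons h]
    congr 1
    simp [List.getD_eq_getElem?_getD, List.getElem?_eq_getElem h]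
  rw [hd, List.take_succ_cons]
theorem take_close (g : List Char) (b : Nat) (hb : b + 1 < g.length) :
    ∀ d j, j + d = b →
      (g.drop j).take d ++ [g.getD b ' ', g.getD (b+1) ' '] = (g.drop j).take (d + 2) := by
  intro d
  induction d with
  | zero =>
    intro j hj; subst hj
    simp only [Nat.add_zero] at *
    rw [List.take_zero, List.nil_append]
    rw [show (0+2 : Nat) = 1 + 1 from rfl]
    rw [take_drop_succ g j 1 (by omega), take_drop_succ g (j+1) 0 (by omega)]
    simp
  | succ d ih =>
    intro j hj
    have hjlen : j < g.length := by omega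
    rw [take_drop_succ g j d hjlen, List.cons_append,
        show d + 1 + 2 = (d + 2) + 1 from rfl,
        take_drop_succ g j (d+2) hjlen,
        ih (j+1) (by omega)]
theorem loopB_none {g : List Char} {i : Nat} (h : findSub g ['A','A'] i = none) :
    loopB g i = [] := by
  rw [loopB]
  split
  · rfl
  · rename_i a ha
    rw [h] at ha
    cases ha

theorem loopB_open_none {g : List Char} {i a : Nat} (hA : findSub g ['A','A'] i = some a)
    (hB : findSub g ['B','B'] (a+2) = none) : loopB g i = [] := by
  rw [loopB]
  split
  · rfl
  · rename_i a' ha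
    rw [hA] at ha
    injection ha with ha
    subst ha
    split
    · rfl
    · rename_i b hb
      rw [hB] at hb
      cases hb

theorem loopB_pair {g : List Char} {i a b : Nat} (hA : findSub g ['A','A'] i = some a)
    (hB : findSub g ['B','B'] (a+2) = some b) :
    loopB g i = (g.drop a).take (b + 2 - a) :: loopB g (b + 2) := by
  rw [loopB]
  split
  · rename_i ha
    rw [hA] at ha
    cases ha
  · rename_i a' ha
    rw [hA] at ha
    injection ha with ha
    subst ha
    split
    · rename_i hb
      rw [hB] at hb
      cases hb
    · rename_i b' hb
      rw [hB] at hb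
      injection hb with hb
      subst hb
      rfl

theorem loopB_congr (g : List Char) (i i' : Nat)
    (h : findSub g ['A','A'] i = findSub g ['A','A'] i') : loopB g i = loopB g i' := by
  rw [loopB, loopB, h]

-- the gene list appended from index i on, in the "outside a gene" state
theorem loopA_acc (g : List Char) :
    ∀ n i geny czy gen, g.length - i ≤ n →
      znGenyLoopA g i geny czy gen = geny ++ znGenyLoopA g i [] czy gen := by
  intro n
  induction n with
  | zero =>
    intro i geny czy gen hn
    rw [znGenyLoopA]
    conv_rhs => rw [znGenyLoopA]
    rw [dif_neg (by omega), dif_neg (by omega)]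
    simp
  | succ n ih =>
    intro i geny czy gen hn
    by_cases hl : i + 1 < g.length
    · rw [znGenyLoopA]
      conv_rhs => rw [znGenyLoopA]
      rw [dif_pos hl, dif_pos hl]
      simp only []
      split_ifs with h1 h2 h3
      · rw [ih (i+1) geny true _ (by omega), ih (i+1) [] true _ (by omega)]
      · rw [ih (i+1) (geny ++ [gen ++ ['B','B']]) false _ (by omega),
            ih (i+1) ([] ++ [gen ++ ['B','B']]) false _ (by omega)]
        simp
      · rw [ih (i+1) geny czy _ (by omega), ih (i+1) [] czy _ (by omega)]
      · rw [ih (i+1) geny czy gen (by omega), ih (i+1) [] czy gen (by omega)]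
    · rw [znGenyLoopA]
      conv_rhs => rw [znGenyLoopA]
      rw [dif_neg hl, dif_neg hl]
      simp

def geneTail (g : List Char) (i : Nat) (gen : List Char) : List (List Char) :=
  match findSub g ['B','B'] i with
  | none => []
  | some b => (gen ++ (g.drop i).take (b - i) ++ ['B','B']) :: loopB g (b + 2)

theorem geneTail_none {g : List Char} {i : Nat} (gen : List Char)
    (h : findSub g ['B','B'] i = none) : geneTail g i gen = [] := by
  unfold geneTail
  rw [h]

theorem geneTail_some {g : List Char} {i b : Nat} (gen : List Char)
    (h : findSub g ['B','B'] i = some b) :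
    geneTail g i gen = (gen ++ (g.drop i).take (b - i) ++ ['B','B']) :: loopB g (b + 2) := by
  unfold geneTail
  rw [h]

theorem scan_eq (g : List Char) :
    ∀ n i, g.length - i ≤ n →
      (∀ gen, znGenyLoopA g i [] false gen = loopB g i) ∧
      (∀ gen, znGenyLoopA g i [] true gen = geneTail g i gen) := by
  intro n
  induction n with
  | zero =>
    intro i hn
    constructor
    · intro gen
      rw [znGenyLoopA, dif_neg (by omega)]
      rw [loopB_none (findSub_pair_none g 'A' 'A' g.length i (by omega) (by omega))]
    · intro gen
      rw [znGenyLoopA, dif_neg (by omega)]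
      rw [geneTail_none gen (findSub_pair_none g 'B' 'B' g.length i (by omega) (by omega))]
  | succ n ih =>
    intro i hn
    by_cases hl : i + 1 < g.length
    · have hIH := ih (i+1) (by omega)
      have hilen : i < g.length := by omega
      constructor
      · intro gen
        rw [znGenyLoopA, dif_pos hl]
        simp only []
        by_cases hAA : g.getD i ' ' = 'A' ∧ g.getD (i+1) ' ' = 'A'
        · rw [if_pos (by exact ⟨hAA.1, hAA.2, by trivial⟩)]
          rw [hIH.2 ([] ++ [g.getD i ' '])]
          have hfA : findSub g ['A','A'] i = some i :=
            findSub_hit g _ i hilen ((pref2_iff g i 'A' 'A').mpr ⟨hl, hAA.1, hAA.2⟩)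
          have hstep : findSub g ['B','B'] (i+1) = findSub g ['B','B'] (i+2) := by
            have h := findSub_step g ['B','B'] (i+1) (by
              intro hp
              have := (pref2_iff g (i+1) 'B' 'B').mp hp
              rw [hAA.2] at this
              exact absurd this.2.1 (by decide))
            have e : i + 1 + 1 = i + 2 := rfl
            rw [e] at h
            exact h
          cases hfB : findSub g ['B','B'] (i+2) with
          | none =>
            rw [geneTail_none _ (hstep.trans hfB), loopB_open_none hfA hfB]
          | some b =>
            have hb := findSub_some g 'B' 'B' g.length (i+2) b (by omega) hfB
            rw [geneTail_some _ (hstep.trans hfB), loopB_pair hfA hfB]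
            congr 1
            have e2 : b + 2 - i = (b + 1 - i) + 1 := by omega
            rw [e2, take_drop_succ g i (b + 1 - i) hilen]
            have e3 : b + 1 - i = (b - (i+1)) + 2 := by omega
            rw [e3, ← take_close g b hb.2.1 (b - (i+1)) (i+1) (by omega), hb.2.2.1, hb.2.2.2]
            simp
        · rw [if_neg (by intro h; exact hAA ⟨h.1, h.2.1⟩), if_neg (by simp),
              if_neg (by simp)]
          rw [hIH.1 gen]
          apply loopB_congr
          apply (findSub_step g ['A','A'] i ?_).symm
          intro hp
          have := (pref2_iff g i 'A' 'A').mp hp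
          exact hAA ⟨this.2.1, this.2.2⟩
      · intro gen
        rw [znGenyLoopA, dif_pos hl]
        simp only []
        rw [if_neg (by simp)]
        by_cases hBB : g.getD i ' ' = 'B' ∧ g.getD (i+1) ' ' = 'B'
        · rw [if_pos (by exact ⟨hBB.1, hBB.2, by trivial⟩)]
          rw [loopA_acc g g.length (i+1) ([] ++ [gen ++ ['B','B']]) false _ (by omega)]
          rw [hIH.1 (gen ++ ['B','B'])]
          have hfB : findSub g ['B','B'] i = some i :=
            findSub_hit g _ i hilen ((pref2_iff g i 'B' 'B').mpr ⟨hl, hBB.1, hBB.2⟩)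
          rw [geneTail_some gen hfB]
          have hstep : loopB g (i+1) = loopB g (i+2) := by
            apply loopB_congr
            have h := findSub_step g ['A','A'] (i+1) (by
              intro hp
              have := (pref2_iff g (i+1) 'A' 'A').mp hp
              rw [hBB.2] at this
              exact absurd this.2.1 (by decide))
            have e : i + 1 + 1 = i + 2 := rfl
            rw [e] at h
            exact h
          rw [hstep]
          simp
        · rw [if_neg (by intro h; exact hBB ⟨h.1, h.2.1⟩), if_pos (by trivial)]
          rw [hIH.2 (gen ++ [g.getD i ' '])]
          have hstep : findSub g ['B','B'] i = findSub g ['B','B'] (i+1) := by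
            apply findSub_step
            intro hp
            have := (pref2_iff g i 'B' 'B').mp hp
            exact hBB ⟨this.2.1, this.2.2⟩
          cases hfB : findSub g ['B','B'] (i+1) with
          | none =>
            rw [geneTail_none _ hfB, geneTail_none _ (hstep.trans hfB)]
          | some b =>
            have hb := findSub_some g 'B' 'B' g.length (i+1) b (by omega) hfB
            rw [geneTail_some _ hfB, geneTail_some _ (hstep.trans hfB)]
            congr 1
            have e2 : b - i = (b - (i+1)) + 1 := by omega
            rw [e2, take_drop_succ g i (b - (i+1)) hilen]
            simp
    · constructor
      · intro gen
        rw [znGenyLoopA, dif_neg hl]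
        rw [loopB_none (findSub_pair_none g 'A' 'A' g.length i (by omega) (by omega))]
      · intro gen
        rw [znGenyLoopA, dif_neg hl]
        rw [geneTail_none gen (findSub_pair_none g 'B' 'B' g.length i (by omega) (by omega))]
theorem genes_eq (g : List Char) : znajdzGenyA g = znajdzGenyB g := by
  have := (scan_eq g g.length 0 (by omega)).1 []
  simpa [znajdzGenyA, znajdzGenyB] using this

theorem fold_count (l : List String) : ∀ o s : Int,
    l.foldl Z4step (o, s) =
      (o + (l.countP (fun g => decide (g.toList = g.toList.reverse)) : Nat)
         + (l.countP (fun g =>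
              decide (¬ g.toList = g.toList.reverse) &&
              decide (znajdzGenyB g.toList = znajdzGenyB g.toList.reverse)) : Nat),
       s + (l.countP (fun g => decide (g.toList = g.toList.reverse)) : Nat)) := by
  induction l with
  | nil => intro o s; simp
  | cons g t ih =>
    intro o s
    rw [List.foldl_cons]
    simp only [Z4step]
    by_cases hp : g.toList = g.toList.reverse
    · rw [if_pos hp, ih]
      have h1 : decide (g.toList = g.toList.reverse) = true := decide_eq_true hp
      simp only [List.countP_cons, decide_not, h1, Bool.not_true, Bool.false_and,
        reduceIte, Prod.mk.injEq]
      constructor <;> push_cast <;> ring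
    · have h1 : decide (g.toList = g.toList.reverse) = false := decide_eq_false hp
      by_cases hg : znajdzGenyA g.toList = znajdzGenyA g.toList.reverse
      · have hg' : znajdzGenyB g.toList = znajdzGenyB g.toList.reverse := by
          rw [← genes_eq, ← genes_eq]; exact hg
        have h2 : decide (znajdzGenyB g.toList = znajdzGenyB g.toList.reverse) = true := decide_eq_true hg'
        rw [if_neg hp, if_pos hg, ih]
        simp only [List.countP_cons, decide_not, h1, h2, Bool.not_false, Bool.true_and,
          reduceIte, Prod.mk.injEq]
        constructor <;> push_cast <;> ring
      · have hg' : ¬ znajdzGenyB g.toList = znajdzGenyB g.toList.reverse := by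
          rw [← genes_eq, ← genes_eq]; exact hg
        have h2 : decide (znajdzGenyB g.toList = znajdzGenyB g.toList.reverse) = false := decide_eq_false hg'
        rw [if_neg hp, if_neg hg, ih]
        simp only [List.countP_cons, decide_not, h1, h2, Bool.not_false,
          Bool.and_false, Prod.mk.injEq]
        constructor <;> push_cast <;> ring

-- ===== VERDICT (by name: the statement is the Claim_ definition above) =====
theorem Z4_spec : Claim_equal_Z4 := by
  intro genotypy _
  unfold Spec_Z4
  show Z4 genotypy = Z4_alt genotypy
  rw [Z4, Z4_alt, fold_count genotypy 0 0]
  simp
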